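-- pv_equiv track=rewrite | github.com/Jan-Kastner/NAS-Public | src/nas/population/cnn/template.py | check_fully_connected_layers_sequence
-- ===== SOURCE A (Python) =====
-- def check_fully_connected_layers_sequence(rows):
--     fc_occurred = False
--     for i, row in enumerate(rows):
--         if row == "FC":
--             if fc_occurred and i > 0 and rows[i - 1] != "FC":
--                 return False
--             fc_occurred = True
--         elif fc_occurred:
--             return False
--     return True
-- ===== SOURCE B (Python) =====
-- def check_fully_connected_layers_sequence(rows):
--     first = None
--     for i, row in enumerate(rows):
--         if row == "FC":
--             first = i
--             break
--     if first is None: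
--         return True
--     return all(row == "FC" for row in rows[first:])
-- ===== Notes on version B (the rewrite author's own statement) =====
-- stated objective: simpler
-- what changed: Replaces A's single flag-carrying loop (with a back-reference rows[i-1]) by a two-phase decomposition: locate the first "FC" with an enumerate/break scan, then verify that the trailing slice from that index is all "FC".
import Mathlib
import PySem

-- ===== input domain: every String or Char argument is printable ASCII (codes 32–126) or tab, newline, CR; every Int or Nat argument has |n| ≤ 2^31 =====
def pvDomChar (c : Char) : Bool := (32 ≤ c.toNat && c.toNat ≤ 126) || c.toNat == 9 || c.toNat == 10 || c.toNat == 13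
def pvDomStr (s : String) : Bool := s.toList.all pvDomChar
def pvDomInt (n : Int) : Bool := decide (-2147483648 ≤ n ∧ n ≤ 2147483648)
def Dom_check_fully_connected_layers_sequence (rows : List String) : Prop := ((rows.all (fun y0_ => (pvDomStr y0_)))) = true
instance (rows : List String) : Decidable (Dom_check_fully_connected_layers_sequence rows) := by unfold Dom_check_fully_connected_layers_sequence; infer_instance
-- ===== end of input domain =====

-- B replaces A's single flag-carrying loop by a find-first-"FC" scan followed by an
-- all-"FC" check on the trailing slice (objective: simpler decomposition).

-- ===== PORT A =====
-- A's for-loop over enumerate(rows) with the flag fc_occurred, transcribed as structural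
-- recursion over the remaining rows carrying the index i and the flag.
-- rows[i-1] is taken via PySem.List.pyGet?; in the branch where it is read, i > 0 and
-- i < len(rows), so the index is always in range and the .getD "" default is never used.
def pvLoopA (rows : List String) : Nat → Bool → List String → Bool
  | _, _, [] => true
  | i, fc, row :: rest =>
    if row = "FC" then
      if fc ∧ i > 0 ∧ (PySem.List.pyGet? rows ((i : Int) - 1)).getD "" ≠ "FC" then
        false
      else
        pvLoopA rows (i + 1) true rest
    else if fc then
      false
    else
      pvLoopA rows (i + 1) fc rest

def check_fully_connected_layers_sequence (rows : List String) : Bool :=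
  pvLoopA rows 0 false rows

-- ===== PORT B =====
-- first phase: enumerate-with-break scan for the index of the first "FC" (None if absent)
def pvFindFC : List String → Nat → Option Nat
  | [], _ => none
  | row :: rest, i => if row = "FC" then some i else pvFindFC rest (i + 1)

def check_fully_connected_layers_sequence_alt (rows : List String) : Bool :=
  match pvFindFC rows 0 with
  | none => true
  | some first => (PySem.List.slice rows (some (first : Int)) none).all (fun row => row == "FC")

-- ===== PRECONDITION & SPEC =====
def Spec_check_fully_connected_layers_sequence (rows : List String) (out : Bool) : Prop := out = check_fully_connected_layers_sequence_alt rows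
instance (rows : List String) (out : Bool) : Decidable (Spec_check_fully_connected_layers_sequence rows out) := by unfold Spec_check_fully_connected_layers_sequence; infer_instance

-- ===== CLAIM (what is proved, stated in full; the proofs are below) =====
def Claim_equal_check_fully_connected_layers_sequence : Prop := ∀ (rows : List String), Dom_check_fully_connected_layers_sequence rows → Spec_check_fully_connected_layers_sequence rows (check_fully_connected_layers_sequence rows)

-- ===== LEMMAS AND PROOFS =====

-- Once the flag is set having just seen "FC" at index i-1, A's loop accepts exactly
-- an all-"FC" tail.
theorem pvLoopA_true (rows : List String) (i : Nat) (hi : 1 ≤ i)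
    (hprev : (PySem.List.pyGet? rows ((i : Int) - 1)).getD "" = "FC") :
    pvLoopA rows i true (rows.drop i) = (rows.drop i).all (fun row => row == "FC") := by
  have main : ∀ n i, rows.length - i ≤ n → 1 ≤ i →
      (PySem.List.pyGet? rows ((i : Int) - 1)).getD "" = "FC" →
      pvLoopA rows i true (rows.drop i) = (rows.drop i).all (fun row => row == "FC") := by
    intro n
    induction n with
    | zero =>
      intro i hn _ _
      have h : rows.length ≤ i := by omega
      simp [List.drop_eq_nil_of_le h, pvLoopA]
    | succ n ih =>
      intro i hn hi hprev
      by_cases hlen : rows.length ≤ i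
      · simp [List.drop_eq_nil_of_le hlen, pvLoopA]
      · have hlt : i < rows.length := by omega
        rw [List.drop_eq_getElem_cons hlt]
        by_cases hrow : rows[i] = "FC"
        · have hprev' : (PySem.List.pyGet? rows ((((i : Nat) + 1 : Nat) : Int) - 1)).getD "" = "FC" := by
            have : ((((i : Nat) + 1 : Nat) : Int) - 1) = ((i : Nat) : Int) := by push_cast; ring
            rw [this, PySem.List.pyGet?_natCast, List.getElem?_eq_getElem hlt]
            simpa using hrow
          have := ih (i + 1) (by omega) (by omega) hprev'
          simp [pvLoopA, hrow, hprev, this]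
        · rw [pvLoopA, if_neg hrow, if_pos rfl, List.all_cons]
          have hb : (rows[i] == "FC") = false := by simp [hrow]
          rw [hb, Bool.false_and]
  exact main (rows.length - i) i le_rfl hi hprev

-- While the flag is unset, A's loop agrees with B's find-then-check decomposition.
theorem pvLoopA_false (rows : List String) (i : Nat) :
    pvLoopA rows i false (rows.drop i) =
      (match pvFindFC (rows.drop i) i with
       | none => true
       | some k => (rows.drop k).all (fun row => row == "FC")) := by
  have main : ∀ n i, rows.length - i ≤ n →
      pvLoopA rows i false (rows.drop i) =
        (match pvFindFC (rows.drop i) i with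
         | none => true
         | some k => (rows.drop k).all (fun row => row == "FC")) := by
    intro n
    induction n with
    | zero =>
      intro i hn
      have h : rows.length ≤ i := by omega
      simp [List.drop_eq_nil_of_le h, pvLoopA, pvFindFC]
    | succ n ih =>
      intro i hn
      by_cases hlen : rows.length ≤ i
      · simp [List.drop_eq_nil_of_le hlen, pvLoopA, pvFindFC]
      · have hlt : i < rows.length := by omega
        rw [List.drop_eq_getElem_cons hlt]
        by_cases hrow : rows[i] = "FC"
        · have hprev : (PySem.List.pyGet? rows ((((i : Nat) + 1 : Nat) : Int) - 1)).getD "" = "FC" := by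
            have : ((((i : Nat) + 1 : Nat) : Int) - 1) = ((i : Nat) : Int) := by push_cast; ring
            rw [this, PySem.List.pyGet?_natCast, List.getElem?_eq_getElem hlt]
            simpa using hrow
          have htail := pvLoopA_true rows (i + 1) (by omega) hprev
          have hdrop : (List.drop i rows).all (fun row => row == "FC")
              = (List.drop (i + 1) rows).all (fun row => row == "FC") := by
            rw [List.drop_eq_getElem_cons hlt]; simp [hrow]
          simp [pvLoopA, pvFindFC, hrow, htail, hdrop]
        · have := ih (i + 1) (by omega)
          simp [pvLoopA, pvFindFC, hrow, this]
  exact main (rows.length - i) i le_rfl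

-- ===== VERDICT (by name: the statement is the Claim_ definition above) =====
theorem check_fully_connected_layers_sequence_spec : Claim_equal_check_fully_connected_layers_sequence := by
  intro rows _
  unfold Spec_check_fully_connected_layers_sequence check_fully_connected_layers_sequence
    check_fully_connected_layers_sequence_alt
  have h := pvLoopA_false rows 0
  simp only [List.drop_zero] at h
  rw [h]
  cases hF : pvFindFC rows 0 with
  | none => simp
  | some k =>
    simp only [PySem.List.slice_from_natCast]
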